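-- pv_equiv track=rewrite | github.com/juntuu/advent_of_code_2019 | day_24/solution.py | bio_div
-- ===== SOURCE A (Python) =====
-- def bio_div(grid):
-- 	total = 0
-- 	i = 0
-- 	for r in grid:
-- 		for c in r:
-- 			if c == '#':
-- 				total += 2 ** i
-- 			i += 1
-- 	return total
-- ===== SOURCE B (Python) =====
-- def bio_div(grid):
--     cells = [c for r in grid for c in r]
--     total = 0
--     for c in reversed(cells):
--         total = total * 2 + (1 if c == '#' else 0)
--     return total
-- ===== Notes on version B (the rewrite author's own statement) =====
-- stated objective: alternative
-- what changed: Replaces A's power-of-two summation with a running index by flattening the grid and folding it back-to-front with a Horner step (total = total*2 + bit), so no exponentiation and no index counter are needed.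
import Mathlib
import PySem

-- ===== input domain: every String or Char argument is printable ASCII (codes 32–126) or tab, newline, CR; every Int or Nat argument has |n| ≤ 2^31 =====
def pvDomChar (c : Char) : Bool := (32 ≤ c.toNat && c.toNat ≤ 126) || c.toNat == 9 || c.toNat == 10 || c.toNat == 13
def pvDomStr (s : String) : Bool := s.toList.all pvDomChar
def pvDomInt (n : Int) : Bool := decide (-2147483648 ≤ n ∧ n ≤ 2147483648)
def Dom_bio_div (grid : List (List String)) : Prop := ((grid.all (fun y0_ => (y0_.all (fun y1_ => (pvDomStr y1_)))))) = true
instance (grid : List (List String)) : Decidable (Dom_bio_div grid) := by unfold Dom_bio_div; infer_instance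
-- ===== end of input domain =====

-- B replaces A's indexed power-of-two summation with a back-to-front Horner fold over the flattened cells (alternative decomposition, same cost).

-- ===== PORT A =====
-- state (total, i); i is the running cell counter, always ≥ 0 in Python, so tracked as Nat
def bio_div (grid : List (List String)) : Int :=
  (grid.foldl (fun (s : Int × Nat) r =>
      r.foldl (fun (s : Int × Nat) c =>
        (if c == "#" then s.1 + 2 ^ s.2 else s.1, s.2 + 1)) s) ((0 : Int), (0 : Nat))).1

-- ===== PORT B =====
def bio_div_alt (grid : List (List String)) : Int :=
  let cells := grid.flatMap (fun r => r)
  cells.reverse.foldl (fun (t : Int) c => t * 2 + (if c == "#" then 1 else 0)) 0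

-- ===== PRECONDITION & SPEC =====
def Spec_bio_div (grid : List (List String)) (out : Int) : Prop := out = bio_div_alt grid
instance (grid : List (List String)) (out : Int) : Decidable (Spec_bio_div grid out) := by unfold Spec_bio_div; infer_instance

-- ===== CLAIM (what is proved, stated in full; the proofs are below) =====
def Claim_equal_bio_div : Prop := ∀ (grid : List (List String)), Dom_bio_div grid → Spec_bio_div grid (bio_div grid)

-- ===== LEMMAS AND PROOFS =====
def pvAstep (s : Int × Nat) (c : String) : Int × Nat :=
  (if c == "#" then s.1 + 2 ^ s.2 else s.1, s.2 + 1)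

def pvVal (l : List String) : Int :=
  l.reverse.foldl (fun (t : Int) c => t * 2 + (if c == "#" then 1 else 0)) 0

theorem pvVal_cons (c : String) (cs : List String) :
    pvVal (c :: cs) = (if c == "#" then 1 else 0) + 2 * pvVal cs := by
  simp [pvVal, List.foldl_append]
  ring

theorem pvAflat (grid : List (List String)) (s : Int × Nat) :
    grid.foldl (fun s r => r.foldl pvAstep s) s = (grid.flatMap (fun r => r)).foldl pvAstep s := by
  induction grid generalizing s with
  | nil => rfl
  | cons r rs ih => simp [List.foldl_append, ih]

theorem pvAkey (cells : List String) (t : Int) (i : Nat) :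
    cells.foldl pvAstep (t, i) = (t + 2 ^ i * pvVal cells, i + cells.length) := by
  induction cells generalizing t i with
  | nil => simp [pvVal]
  | cons c cs ih =>
    simp only [List.foldl_cons, pvAstep, ih, pvVal_cons, List.length_cons]
    refine Prod.ext ?_ (by simp; omega)
    simp only [pow_succ]
    split <;> ring

-- ===== VERDICT (by name: the statement is the Claim_ definition above) =====
theorem bio_div_spec : Claim_equal_bio_div := by
  intro grid _
  show bio_div grid = bio_div_alt grid
  have h2 : bio_div grid = (grid.foldl (fun s r => r.foldl pvAstep s) ((0:Int), (0:Nat))).1 := rfl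
  rw [h2, pvAflat, pvAkey]
  simp [bio_div_alt, pvVal]
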